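-- pv_equiv track=rewrite | github.com/Justinenintech/nac-ele | split/split.py | split_701111
-- ===== SOURCE A (Python) =====
-- import itertools as it
-- from typing import List, Dict
--
-- def split_701111(numbers: List[tuple]) -> list:
--     """
--     三码直选前三组选单式
--     :param numbers:选择的号码
--     :return: List
--     """
--     lst1 = ['01', '02', '03', '04', '05', '06', '07', '08', '09', '10', '11']
--     lst2 = []
--     for i in set(list(it.permutations(lst1, 5))):
--         for j in set(numbers):
--             # str_number1 = ''.join(map(str, set(j)))
--             # str_number2 = ''.join(map(str, set(i[:3])))
--             if set(j) == set(i[:3]):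
--                 lst2.append(i)
--     return lst2
-- ===== SOURCE B (Python) =====
-- import itertools as it
-- from typing import List
--
-- def split_701111(numbers: List[tuple]) -> list:
--     """Counter keyed by frozenset of the chosen triples, then one dict lookup
--     per permutation instead of an inner scan over the chosen numbers."""
--     lst1 = ['01', '02', '03', '04', '05', '06', '07', '08', '09', '10', '11']
--     cnt = {}
--     for j in set(numbers):
--         key = frozenset(j)
--         cnt[key] = cnt.get(key, 0) + 1
--     lst2 = []
--     for p in set(it.permutations(lst1, 5)):
--         lst2 += [p] * cnt.get(frozenset(p[:3]), 0)
--     return lst2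
-- ===== Notes on version B (the rewrite author's own statement) =====
-- stated objective: faster
-- what changed: A scans all chosen numbers inside the loop over all 55440 permutations; B precomputes a dict counting the distinct chosen tuples per frozenset key and does a single O(1) lookup per permutation, appending that many copies.
import Mathlib
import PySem

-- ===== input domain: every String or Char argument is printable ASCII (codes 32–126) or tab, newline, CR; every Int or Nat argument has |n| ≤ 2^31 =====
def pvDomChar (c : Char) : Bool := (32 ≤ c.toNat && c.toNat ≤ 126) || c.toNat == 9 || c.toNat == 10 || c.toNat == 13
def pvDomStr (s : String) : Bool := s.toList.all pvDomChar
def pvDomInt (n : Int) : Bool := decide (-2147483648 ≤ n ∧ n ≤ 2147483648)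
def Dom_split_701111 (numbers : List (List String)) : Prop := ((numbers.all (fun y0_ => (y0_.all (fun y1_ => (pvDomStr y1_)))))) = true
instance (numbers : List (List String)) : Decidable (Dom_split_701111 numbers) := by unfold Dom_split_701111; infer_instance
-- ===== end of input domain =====

-- B replaces A's inner scan over the chosen numbers by a dict precomputed once
-- (keyed by frozenset), one lookup per permutation (objective: faster).
-- The Python list order of both functions iterates a hash set; outputs are compared as sets.

-- ===== PORT A =====
-- itertools.permutations(xs, k): tuples of elements at distinct indices, in
-- lexicographic index order (exact hand port of the library call; used by both sides)
def pyPermutations : Nat → List String → List (List String)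
  | 0, _ => [[]]
  | k+1, xs => (List.range xs.length).flatMap
      (fun idx => (pyPermutations k (xs.eraseIdx idx)).map (fun t => xs.getD idx "" :: t))

-- set(list(it.permutations(lst1, 5))): the permutations of the 11 distinct labels are
-- already pairwise distinct, so set() only deduplicates nothing and fixes Python's hash
-- iteration order, which PySem does not model (outputs are compared as sets); ported as
-- the permutation list itself — in both ports alike.
def split_701111 (numbers : List (List String)) : List (List String) :=
  let lst1 : List String := ["01","02","03","04","05","06","07","08","09","10","11"]
  -- set(numbers) is loop-invariant (numbers is never mutated): computed once here,
  -- exactly the value Python recomputes on each outer iteration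
  let jset := PySem.Set.ofList numbers
  (pyPermutations 5 lst1).foldl
    (fun lst2 i =>
      jset.foldl
        (fun lst2 j =>
          if PySem.Set.equal (PySem.Set.ofList j) (PySem.Set.ofList (i.take 3)) then
            lst2 ++ [i]
          else lst2)
        lst2)
    []

-- ===== PORT B =====
-- frozenset(j) is modelled by its sorted distinct elements: a canonical
-- representative, so key equality coincides with frozenset equality (exact)
def pvFrozen (j : List String) : List String :=
  PySem.List.sorted (PySem.Set.ofList j) (fun x => x) false

def split_701111_alt (numbers : List (List String)) : List (List String) :=
  let lst1 : List String := ["01","02","03","04","05","06","07","08","09","10","11"]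
  let cnt : PySem.Dict (List String) Int :=
    (PySem.Set.ofList numbers).foldl
      (fun d j => PySem.Dict.modify d (pvFrozen j) 0 (· + 1)) PySem.Dict.empty
  (pyPermutations 5 lst1).foldl
    (fun lst2 p => lst2 ++ List.replicate (PySem.Dict.getD cnt (pvFrozen (p.take 3)) 0).toNat p)
    []

-- ===== PRECONDITION & SPEC =====
def Spec_split_701111 (numbers : List (List String)) (out : List (List String)) : Prop := out = split_701111_alt numbers
instance (numbers : List (List String)) (out : List (List String)) : Decidable (Spec_split_701111 numbers out) := by unfold Spec_split_701111; infer_instance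

-- ===== CLAIM (what is proved, stated in full; the proofs are below) =====
def Claim_equal_split_701111 : Prop := ∀ (numbers : List (List String)), Dom_split_701111 numbers → Spec_split_701111 numbers (split_701111 numbers)

-- ===== LEMMAS AND PROOFS =====

-- frozenset keys are equal exactly when the Python sets are equal
theorem pvFrozen_eq_iff (j j' : List String) :
    pvFrozen j = pvFrozen j' ↔ PySem.Set.equal (PySem.Set.ofList j) (PySem.Set.ofList j') = true := by
  unfold pvFrozen
  rw [PySem.List.sorted_id_eq_sorted_id_iff_perm, PySem.Set.equal_iff]
  rw [List.perm_ext_iff_of_nodup (PySem.Set.nodup_ofList j) (PySem.Set.nodup_ofList j')]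

-- the counter dict looked up at a key is the number of matching entries
theorem pv_counter_count (js : List (List String)) (k : List String) :
    PySem.Dict.getD
      (js.foldl (fun d j => PySem.Dict.modify d (pvFrozen j) 0 (· + 1)) PySem.Dict.empty)
      k 0
    = ((js.map pvFrozen).count k : Int) := by
  rw [← List.foldl_map (f := pvFrozen) (g := fun d x => PySem.Dict.modify d x 0 (· + 1))]
  rw [← PySem.Dict.counter_eq_foldl, PySem.Dict.getD_counter]

-- A's inner loop appends i once per matching entry of js
theorem pv_inner_append (js : List (List String)) (i : List String) (acc : List (List String)) :
    js.foldl
      (fun lst2 j =>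
        if PySem.Set.equal (PySem.Set.ofList j) (PySem.Set.ofList (i.take 3)) then lst2 ++ [i] else lst2)
      acc
    = acc ++ List.replicate (js.countP (fun j => PySem.Set.equal (PySem.Set.ofList j) (PySem.Set.ofList (i.take 3)))) i := by
  induction js generalizing acc with
  | nil => simp
  | cons j js ih =>
    simp only [List.foldl_cons, List.countP_cons]
    by_cases h : PySem.Set.equal (PySem.Set.ofList j) (PySem.Set.ofList (i.take 3)) = true
    · simp [h, ih, List.replicate_succ, List.append_assoc]
    · simp [h, ih]

theorem pv_count_eq_countP (js : List (List String)) (i : List String) :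
    (js.map pvFrozen).count (pvFrozen (i.take 3))
    = js.countP (fun j => PySem.Set.equal (PySem.Set.ofList j) (PySem.Set.ofList (i.take 3))) := by
  rw [List.count_eq_countP, List.countP_map]
  apply List.countP_congr
  intro j _
  simp only [Function.comp_apply, beq_iff_eq]
  rw [pvFrozen_eq_iff]

-- ===== VERDICT (by name: the statement is the Claim_ definition above) =====
theorem split_701111_spec : Claim_equal_split_701111 := by
  intro numbers _
  unfold Spec_split_701111 split_701111 split_701111_alt
  have hstep :
      (fun (lst2 : List (List String)) (i : List String) =>
        (PySem.Set.ofList numbers).foldl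
          (fun lst2 j =>
            if PySem.Set.equal (PySem.Set.ofList j) (PySem.Set.ofList (i.take 3)) then
              lst2 ++ [i]
            else lst2)
          lst2)
      = (fun (lst2 : List (List String)) (p : List String) =>
          lst2 ++ List.replicate
            (PySem.Dict.getD
              ((PySem.Set.ofList numbers).foldl
                (fun d j => PySem.Dict.modify d (pvFrozen j) 0 (· + 1))
                (PySem.Dict.empty : PySem.Dict (List String) Int))
              (pvFrozen (p.take 3)) 0).toNat p) := by
    funext acc i
    rw [pv_inner_append, pv_counter_count, pv_count_eq_countP]
    simp
  simp only [hstep]
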